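-- pv_equiv track=rewrite | github.com/mysteriousHerb/lazyrouter | lazyrouter/context_compressor.py | _find_recent_boundary
-- ===== SOURCE A (Python) =====
-- from typing import Any, Dict, List, Optional, Tuple
--
-- def _find_recent_boundary(
--     messages: List[Dict[str, Any]], keep_recent_exchanges: int
-- ) -> int:
--     """Return index where recent user exchanges start.
--
--     `messages` should be non-system conversation messages in original order.
--     """
--     if keep_recent_exchanges <= 0:
--         return len(messages)
--
--     user_count = 0
--     for i in range(len(messages) - 1, -1, -1):
--         if messages[i].get("role") == "user":
--             user_count += 1
--             if user_count >= keep_recent_exchanges: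
--                 return i
--     return 0
-- ===== SOURCE B (Python) =====
-- from typing import Any, Dict, List
--
--
-- def _find_recent_boundary(
--     messages: List[Dict[str, Any]], keep_recent_exchanges: int
-- ) -> int:
--     """Return index where recent user exchanges start.
--
--     Single forward pass collecting user-message indices, then a direct lookup.
--     """
--     if keep_recent_exchanges <= 0:
--         return len(messages)
--     user_indices = [i for i, m in enumerate(messages) if m.get("role") == "user"]
--     if len(user_indices) < keep_recent_exchanges:
--         return 0
--     return user_indices[-keep_recent_exchanges]
-- ===== Notes on version B (the rewrite author's own statement) =====
-- stated objective: alternative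
-- what changed: Replaces the backward counting scan with a single forward pass that collects all user-message indices and then reads the k-th from the end directly.
import Mathlib
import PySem

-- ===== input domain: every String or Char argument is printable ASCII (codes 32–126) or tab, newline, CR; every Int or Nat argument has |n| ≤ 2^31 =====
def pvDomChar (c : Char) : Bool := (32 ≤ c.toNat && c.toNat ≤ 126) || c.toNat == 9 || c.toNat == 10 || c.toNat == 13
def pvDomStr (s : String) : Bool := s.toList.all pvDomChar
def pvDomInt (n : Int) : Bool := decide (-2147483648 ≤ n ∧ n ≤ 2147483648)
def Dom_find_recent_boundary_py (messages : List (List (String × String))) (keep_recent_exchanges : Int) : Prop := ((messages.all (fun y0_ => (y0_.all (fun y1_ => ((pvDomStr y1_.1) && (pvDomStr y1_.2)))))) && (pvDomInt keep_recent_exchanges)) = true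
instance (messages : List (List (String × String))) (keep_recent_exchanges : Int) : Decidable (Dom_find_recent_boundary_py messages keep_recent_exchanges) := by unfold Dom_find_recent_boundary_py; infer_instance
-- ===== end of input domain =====

-- B replaces A's backward counting scan by one forward pass collecting user indices
-- plus a direct negative-index lookup (alternative decomposition, same cost).

-- ===== PORT A =====
-- the backward for-loop 'for i in range(len(messages)-1, -1, -1)': m counts how many
-- indices remain; the index processed at step m+1 is m (so i runs len-1, …, 0)
def find_recent_boundary_loopA (messages : List (List (String × String))) (k : Int) :
    Nat → Int → Int
  | 0, _ => 0
  | m + 1, cnt =>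
    match PySem.List.pyGet? messages (m : Int) with
    | none => 0   -- unreachable: m < len messages at every call
    | some msg =>
      if List.lookup "role" msg = some "user" then
        if cnt + 1 ≥ k then (m : Int)
        else find_recent_boundary_loopA messages k m (cnt + 1)
      else find_recent_boundary_loopA messages k m cnt

def find_recent_boundary_py (messages : List (List (String × String))) (keep_recent_exchanges : Int) : Int :=
  if keep_recent_exchanges ≤ 0 then (messages.length : Int)
  else find_recent_boundary_loopA messages keep_recent_exchanges messages.length 0

-- ===== PORT B =====
def find_recent_boundary_py_alt (messages : List (List (String × String))) (keep_recent_exchanges : Int) : Int :=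
  if keep_recent_exchanges ≤ 0 then (messages.length : Int)
  else
    let user_indices : List Int :=
      (PySem.List.enumerate messages).filterMap
        (fun p => if List.lookup "role" p.2 = some "user" then some p.1 else none)
    if (user_indices.length : Int) < keep_recent_exchanges then 0
    else
      match PySem.List.pyGet? user_indices (-keep_recent_exchanges) with
      | some i => i
      | none => 0   -- unreachable: keep_recent_exchanges ≤ len user_indices here

-- ===== PRECONDITION & SPEC =====
def Spec_find_recent_boundary_py (messages : List (List (String × String))) (keep_recent_exchanges : Int) (out : Int) : Prop := out = find_recent_boundary_py_alt messages keep_recent_exchanges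
instance (messages : List (List (String × String))) (keep_recent_exchanges : Int) (out : Int) : Decidable (Spec_find_recent_boundary_py messages keep_recent_exchanges out) := by unfold Spec_find_recent_boundary_py; infer_instance

-- ===== CLAIM (what is proved, stated in full; the proofs are below) =====
def Claim_equal_find_recent_boundary_py : Prop := ∀ (messages : List (List (String × String))) (keep_recent_exchanges : Int), Dom_find_recent_boundary_py messages keep_recent_exchanges → Spec_find_recent_boundary_py messages keep_recent_exchanges (find_recent_boundary_py messages keep_recent_exchanges)

-- ===== LEMMAS AND PROOFS =====

-- proof-side: the user indices among the first m messages, in increasing order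
def pvUIdx (messages : List (List (String × String))) (m : Nat) : List Int :=
  (List.range m).filterMap
    (fun i => if List.lookup "role" (messages.getD i []) = some "user" then some ((i : Nat) : Int) else none)

theorem pvUIdx_succ (messages : List (List (String × String))) (m : Nat) :
    pvUIdx messages (m + 1) =
      pvUIdx messages m ++
        (if List.lookup "role" (messages.getD m []) = some "user" then [((m : Nat) : Int)] else []) := by
  rw [pvUIdx, pvUIdx, List.range_succ, List.filterMap_append]
  congr 1
  simp only [List.filterMap_cons, List.filterMap_nil]
  split_ifs <;> rfl

-- B's forward pass computes exactly pvUIdx over the whole list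
theorem pvEnum_eq (messages : List (List (String × String))) : ∀ (xs : List (List (String × String))) (s : Int),
    (PySem.List.enumerate xs s).filterMap
        (fun p => if List.lookup "role" p.2 = some "user" then some p.1 else none) =
      (List.range xs.length).filterMap
        (fun i => if List.lookup "role" (xs.getD i []) = some "user" then some (s + (i : Int)) else none)
  | [], s => by simp [PySem.List.enumerate_nil]
  | x :: xs, s => by
    rw [PySem.List.enumerate_cons, List.filterMap_cons]
    rw [pvEnum_eq messages xs (s + 1)]
    rw [List.length_cons, List.range_succ_eq_map, List.filterMap_cons, List.filterMap_map]
    have h2 : List.filterMap ((fun i => if List.lookup "role" ((x :: xs).getD i []) = some "user" then some (s + (i : Int)) else none) ∘ Nat.succ) (List.range xs.length)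
        = List.filterMap (fun i => if List.lookup "role" (xs.getD i []) = some "user" then some (s + 1 + (i : Int)) else none) (List.range xs.length) := by
      apply List.filterMap_congr
      intro i _
      simp only [Function.comp, List.getD_cons_succ]
      split_ifs with h
      · congr 1; push_cast; ring
      · rfl
    rw [h2]
    by_cases hx : List.lookup "role" x = some "user" <;> simp [hx]

-- main invariant of A's backward loop
theorem pvLoopA_eq (messages : List (List (String × String))) (k : Int) :
    ∀ (m : Nat), m ≤ messages.length → ∀ (cnt : Int), cnt < k →
      find_recent_boundary_loopA messages k m cnt =
        (if ((pvUIdx messages m).length : Int) < k - cnt then 0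
         else (pvUIdx messages m).getD ((pvUIdx messages m).length - (k - cnt).toNat) 0)
  | 0, _, cnt, hc => by
    have h0 : ((pvUIdx messages 0).length : Int) < k - cnt := by simp [pvUIdx]; omega
    rw [if_pos h0]
    rfl
  | m + 1, hm, cnt, hc => by
    have hmlt : m < messages.length := by omega
    have hget : PySem.List.pyGet? messages (m : Int) = some (messages.getD m []) := by
      rw [PySem.List.pyGet?_natCast]
      simp [List.getD_eq_getElem?_getD, List.getElem?_eq_getElem hmlt]
    rw [find_recent_boundary_loopA, hget, pvUIdx_succ]
    by_cases hu : List.lookup "role" (messages.getD m []) = some "user"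
    · simp only [hu, if_true]
      by_cases hk : cnt + 1 ≥ k
      · -- k - cnt = 1
        have h1 : k - cnt = 1 := by omega
        rw [if_pos hk]
        have hlen : ((pvUIdx messages m ++ [((m : Nat) : Int)]).length : Int) = (pvUIdx messages m).length + 1 := by
          simp
        rw [if_neg (by rw [hlen]; omega)]
        have : (pvUIdx messages m ++ [((m : Nat) : Int)]).length - (k - cnt).toNat
            = (pvUIdx messages m).length := by simp [h1]
        rw [this]
        simp
      · rw [if_neg hk]
        rw [pvLoopA_eq messages k m (by omega) (cnt + 1) (by omega)]
        have h2 : 2 ≤ k - cnt := by omega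
        have htn : (k - cnt).toNat = (k - (cnt + 1)).toNat + 1 := by omega
        by_cases hlt : ((pvUIdx messages m).length : Int) < k - (cnt + 1)
        · rw [if_pos hlt, if_pos (by simp; omega)]
        · rw [if_neg hlt, if_neg (by simp; omega)]
          have hidx : (pvUIdx messages m ++ [((m : Nat) : Int)]).length - (k - cnt).toNat
              = (pvUIdx messages m).length - (k - (cnt + 1)).toNat := by
            simp [htn]
          rw [hidx]
          have hlt2 : (pvUIdx messages m).length - (k - (cnt + 1)).toNat < (pvUIdx messages m).length := by
            omega
          rw [List.getD_eq_getElem?_getD, List.getD_eq_getElem?_getD,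
            List.getElem?_append_left hlt2]
    · simp only [hu, if_false]
      rw [pvLoopA_eq messages k m (by omega) cnt hc]
      simp

-- ===== VERDICT (by name: the statement is the Claim_ definition above) =====
theorem find_recent_boundary_py_spec : Claim_equal_find_recent_boundary_py := by
  intro messages k _
  unfold Spec_find_recent_boundary_py find_recent_boundary_py find_recent_boundary_py_alt
  by_cases hk : k ≤ 0
  · simp [hk]
  · rw [if_neg hk, if_neg hk]
    have hk1 : 1 ≤ k := by omega
    rw [pvLoopA_eq messages k messages.length le_rfl 0 (by omega)]
    have henum := pvEnum_eq messages messages 0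
    simp only [zero_add] at henum
    rw [henum]
    have hlen : ((List.range messages.length).filterMap
        (fun i => if List.lookup "role" (messages.getD i []) = some "user" then some ((i : Nat) : Int) else none))
        = pvUIdx messages messages.length := rfl
    rw [hlen]
    set ui := pvUIdx messages messages.length with hui
    by_cases hlt : ((ui.length : Int)) < k
    · rw [if_pos (by omega), if_pos hlt]
    · rw [if_neg (by omega), if_neg hlt]
      have hkn : -k = -((k.toNat : Nat) : Int) := by omega
      rw [hkn, PySem.List.pyGet?_neg_natCast ui k.toNat (by omega) (by omega)]
      have : ui.length - k.toNat < ui.length := by omega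
      rw [List.getElem?_eq_getElem this]
      simp [List.getD_eq_getElem?_getD, List.getElem?_eq_getElem this]
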